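-- pv_equiv track=rewrite | github.com/noguesan/TP_Integrado_lenguajes | src/utils/funciones.py | separar_por_trimestre
-- ===== SOURCE A (Python) =====
-- def separar_por_trimestre(dict_anios):
--     dict_final = {}
--     for anio in dict_anios:
--         dict_temporal = {}
--
--         for filas in dict_anios[anio]:
--             trimestre = filas[2]
--             if trimestre not in dict_temporal:
--                 dict_temporal[trimestre] = []
--             dict_temporal[trimestre].append(filas)
--
--         dict_final[anio] = dict_temporal
--     return dict_final
-- ===== SOURCE B (Python) =====
-- def separar_por_trimestre(dict_anios):
--     return {
--         anio: {t: [f for f in filas if f[2] == t]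
--                for t in dict.fromkeys(f[2] for f in filas)}
--         for anio, filas in dict_anios.items()
--     }
-- ===== Notes on version B (the rewrite author's own statement) =====
-- stated objective: alternative
-- what changed: Replaces A's scatter pass that mutates a per-year dict with membership-checked insertion by a dict comprehension that first collects the distinct quarter keys in first-occurrence order (dict.fromkeys) and then builds each group by filtering the year's rows.
import Mathlib
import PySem

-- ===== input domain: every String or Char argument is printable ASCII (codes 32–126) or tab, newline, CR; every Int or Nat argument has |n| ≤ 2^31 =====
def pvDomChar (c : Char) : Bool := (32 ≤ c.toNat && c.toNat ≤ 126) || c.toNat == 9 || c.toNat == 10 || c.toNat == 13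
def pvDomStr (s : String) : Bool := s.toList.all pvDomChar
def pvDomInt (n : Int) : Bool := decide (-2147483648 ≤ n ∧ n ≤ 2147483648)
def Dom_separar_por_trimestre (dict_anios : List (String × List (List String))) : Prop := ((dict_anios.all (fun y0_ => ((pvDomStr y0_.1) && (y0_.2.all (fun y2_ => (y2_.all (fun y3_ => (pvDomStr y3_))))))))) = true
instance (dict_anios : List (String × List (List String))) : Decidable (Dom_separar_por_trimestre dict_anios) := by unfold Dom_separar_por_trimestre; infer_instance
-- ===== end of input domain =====

-- B groups each year's rows by building the distinct quarter keys first (dict.fromkeys) and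
-- filtering the rows per quarter, instead of A's membership-checked scatter pass into a mutated dict.

-- ===== PORT A =====
-- inner loop of A: dict_temporal built row by row with `if trimestre not in dict_temporal`
def pvGroupA (rows : List (List String)) : PySem.Dict String (List (List String)) :=
  rows.foldl (fun dt filas =>
    let trimestre := PySem.List.pyGetD filas 2 ""          -- filas[2]; in range under Pre_
    let dt' := if dt.contains trimestre then dt else dt.insert trimestre []
    dt'.modify trimestre [] (fun l => l ++ [filas]))       -- dict_temporal[trimestre].append(filas)
    PySem.Dict.empty

def separar_por_trimestre (dict_anios : List (String × List (List String))) : List (String × List (String × List (List String))) :=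
  let d : PySem.Dict String (List (List String)) := ⟨dict_anios⟩
  (d.keys.foldl (fun df anio =>
      df.insert anio (pvGroupA (d.getD anio [])).items)    -- dict_final[anio] = dict_temporal
    PySem.Dict.empty).items

-- ===== PORT B =====
def separar_por_trimestre_alt (dict_anios : List (String × List (List String))) : List (String × List (String × List (List String))) :=
  dict_anios.map (fun p =>
    (p.1, (PySem.List.dedup (p.2.map (fun f => PySem.List.pyGetD f 2 ""))).map
            (fun t => (t, p.2.filter (fun f => PySem.List.pyGetD f 2 "" == t)))))

-- ===== PRECONDITION & SPEC =====
-- Pre_ requires the association list to have distinct year keys (the invariant of the Python dict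
-- argument, which cannot hold duplicate keys) and every row to have at least 3 entries, because
-- filas[2] raises IndexError on shorter rows (in both A and B).
def Pre_separar_por_trimestre (dict_anios : List (String × List (List String))) : Prop :=
  (dict_anios.map Prod.fst).Nodup ∧ ∀ p ∈ dict_anios, ∀ f ∈ p.2, 3 ≤ f.length
instance (dict_anios : List (String × List (List String))) : Decidable (Pre_separar_por_trimestre dict_anios) := by unfold Pre_separar_por_trimestre; infer_instance
def pvWitness_separar_por_trimestre : (List (String × List (List String))) :=
  [("2020", [["a", "b", "T1"], ["c", "d", "T2"], ["e", "f", "T1"]]), ("2021", [])]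

def Spec_separar_por_trimestre (dict_anios : List (String × List (List String))) (out : List (String × List (String × List (List String)))) : Prop := out = separar_por_trimestre_alt dict_anios
instance (dict_anios : List (String × List (List String))) (out : List (String × List (String × List (List String)))) : Decidable (Spec_separar_por_trimestre dict_anios out) := by unfold Spec_separar_por_trimestre; infer_instance

-- ===== CLAIM (what is proved, stated in full; the proofs are below) =====
def Claim_equal_separar_por_trimestre : Prop := ∀ (dict_anios : List (String × List (List String))), Dom_separar_por_trimestre dict_anios → Pre_separar_por_trimestre dict_anios → Spec_separar_por_trimestre dict_anios (separar_por_trimestre dict_anios)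

-- ===== LEMMAS AND PROOFS =====

-- inserting into a dict that does not contain the key, then overwriting, is one insert
theorem insert_insert_of_not_contains {κ ν : Type} [BEq κ] [LawfulBEq κ]
    (d : PySem.Dict κ ν) (k : κ) (v w : ν) (h : d.contains k = false) :
    (d.insert k v).insert k w = d.insert k w := by
  apply PySem.Dict.ext
  rw [PySem.Dict.items_insert_of_contains _ w (PySem.Dict.contains_insert_self d k v),
      PySem.Dict.items_insert_of_not_contains _ v h,
      PySem.Dict.items_insert_of_not_contains _ w h]
  rw [List.map_append]
  congr 1
  · conv_rhs => rw [← List.map_id d.items]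
    apply List.map_congr_left
    intro p hp
    have hk : p.1 ≠ k := by
      intro he
      have : d.contains k := by
        rw [PySem.Dict.contains_iff_mem_keys]
        exact he ▸ PySem.Dict.mem_keys_of_mem_items d hp
      simp [this] at h
    simp [hk]
  · simp

-- A's membership-checked step is exactly one modify
theorem stepA_eq_modify (dt : PySem.Dict String (List (List String))) (filas : List String) :
    (let trimestre := PySem.List.pyGetD filas 2 ""
     let dt' := if dt.contains trimestre then dt else dt.insert trimestre []
     dt'.modify trimestre [] (fun l => l ++ [filas]))
    = dt.modify (PySem.List.pyGetD filas 2 "") [] (fun l => l ++ [filas]) := by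
  simp only []
  set t := PySem.List.pyGetD filas 2 "" with ht
  by_cases h : dt.contains t
  · simp [h]
  · simp only [h, if_false, Bool.false_eq_true]
    simp only [PySem.Dict.modify]
    rw [PySem.Dict.getD_insert_self,
        insert_insert_of_not_contains _ _ _ _ (by simpa using h),
        PySem.Dict.getD_of_not_contains _ _ (by simpa using h)]

-- a dict with distinct keys is the list of its keys paired with their values
theorem items_eq_keys_map {κ ν : Type} [BEq κ] [LawfulBEq κ]
    (d : PySem.Dict κ ν) (d0 : ν) (h : d.keys.Nodup) :
    d.items = d.keys.map (fun k => (k, d.getD k d0)) := by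
  simp only [PySem.Dict.keys, List.map_map]
  conv_lhs => rw [← List.map_id d.items]
  apply List.map_congr_left
  intro p hp
  have := PySem.Dict.getD_of_mem_items d (k := p.1) (v := p.2) (by simpa using hp) h d0
  simp [Function.comp, this]

-- the inner grouping: A's scatter pass equals B's dedup-then-filter pass
theorem groupA_items (rows : List (List String)) :
    (pvGroupA rows).items =
      (PySem.List.dedup (rows.map (fun f => PySem.List.pyGetD f 2 ""))).map
        (fun t => (t, rows.filter (fun f => PySem.List.pyGetD f 2 "" == t))) := by
  have hfold : pvGroupA rows =
      rows.foldl (fun dt filas => dt.modify (PySem.List.pyGetD filas 2 "") [] (fun l => l ++ [filas]))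
        PySem.Dict.empty := by
    unfold pvGroupA
    congr 1
    funext dt filas
    exact stepA_eq_modify dt filas
  have hnodup : (pvGroupA rows).keys.Nodup := by
    rw [hfold]
    exact PySem.Dict.nodup_keys_foldl_modify_key rows _ [] _ _ PySem.Dict.nodup_keys_empty
  have hkeys : (pvGroupA rows).keys = PySem.List.dedup (rows.map (fun f => PySem.List.pyGetD f 2 "")) := by
    rw [hfold, PySem.Dict.keys_foldl_modify_key rows (fun f => PySem.List.pyGetD f 2 "") [] (fun _ _ l => l ++ [_]) PySem.Dict.empty]
    rw [PySem.List.dedup_eq_ofList]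
    rfl
  have hget : ∀ t, (pvGroupA rows).getD t [] = rows.filter (fun f => PySem.List.pyGetD f 2 "" == t) := by
    intro t
    rw [hfold]
    have hm : rows.foldl (fun dt filas => dt.modify (PySem.List.pyGetD filas 2 "") [] (fun l => l ++ [filas])) PySem.Dict.empty
        = (rows.map (fun f => (PySem.List.pyGetD f 2 "", f))).foldl
            (fun dt p => dt.modify p.1 [] (fun l => l ++ [p.2])) PySem.Dict.empty := by
      rw [List.foldl_map]
    rw [hm, PySem.Dict.getD_foldl_modify_append]
    rw [PySem.Dict.getD_empty, List.nil_append, List.filter_map]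
    simp [Function.comp_def]
  rw [items_eq_keys_map (pvGroupA rows) [] hnodup, hkeys]
  apply List.map_congr_left
  intro t _
  rw [hget t]

-- ===== VERDICT (by name: the statement is the Claim_ definition above) =====
theorem separar_por_trimestre_spec : Claim_equal_separar_por_trimestre := by
  intro dict_anios _ hpre
  obtain ⟨hnd, _⟩ := hpre
  show separar_por_trimestre dict_anios = separar_por_trimestre_alt dict_anios
  unfold separar_por_trimestre separar_por_trimestre_alt
  simp only []
  set d : PySem.Dict String (List (List String)) := ⟨dict_anios⟩ with hd
  have hkeys : d.keys = dict_anios.map Prod.fst := rfl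
  have hknd : d.keys.Nodup := by rw [hkeys]; exact hnd
  rw [PySem.Dict.items_foldl_insert_fresh d.keys (fun a => a)
        (fun anio => (pvGroupA (d.getD anio [])).items) PySem.Dict.empty
        (fun a _ => PySem.Dict.contains_empty a) (by simpa using hknd)]
  have hemp : (PySem.Dict.empty : PySem.Dict String (List (String × List (List String)))).items = [] := rfl
  rw [hemp, List.nil_append, hkeys, List.map_map]
  apply List.map_congr_left
  intro p hp
  have hval : d.getD p.1 [] = p.2 := by
    apply PySem.Dict.getD_of_mem_items d (k := p.1) (v := p.2) _ hknd
    simpa using hp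
  simp only [Function.comp, hval, groupA_items]
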